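-- pv_equiv track=rewrite | github.com/adityaxdiwakar/gsheets-generator | main.py | generate_per_col
-- ===== SOURCE A (Python) =====
-- def COL_REF(c: str) -> str:
--     return f"${c}:${c}"
--
-- def COLROW(c: str, r: str) -> str:
--     return f"{c}{r}"
--
-- def IFNA(r: str, e: str) -> str:
--     return f"IFNA({r}, {e})"
--
-- def INDIRECT(r: str) -> str:
--     return f"INDIRECT({r})"
--
-- def ADDRESS(r, c: str) -> str:
--     return f"ADDRESS({r}, {c})"
--
-- def FLOOR(r: str) -> str:
--     return f"FLOOR({r})"
--
-- def COLUMN(r: str) -> str: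
--     return f"COLUMN({r})"
--
-- def MATCH(r: str, c: str, t: str) -> str:
--     return f"MATCH({r}, {c}, {t})"
--
-- def NA() -> str:
--     return "NA()"
--
-- def MULTIPLY(a, b: str) -> str:
--     return f"MULTIPLY({a}, {b})"
--
-- def DIVIDE(a, b: str) -> str:
--     return f"DIVIDE({a}, {b})"
--
-- def STRING(a: str) -> str:
--     return f"\"{a}\""
--
-- def EQUALS(a, b: str) -> str:
--     return f"{a} = {b}"
--
-- def IF(a, b, c: str) -> str:
--     return f"IF({a}, {b}, {c})"
--
-- columns_unmapped = [0, 10, 20, 30, 40]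
--
-- columns_mapped = [1, 11, 20, 29, 38]
--
-- def get_nearest(n: str, cu, cm: list) -> str:
--     v = EQUALS(n, cu[0])
--
--     if len(cu) == 1:
--         return IF(v, cm[0], NA())
--     return IF(v, cm[0], get_nearest(n, cu[1:], cm[1:]))
--
-- def generate_per_col(s: str, c: list) -> str:
--     m = MATCH(STRING(s), COL_REF(c[0]), 0)
--     div = DIVIDE(m, 10)
--     f = FLOOR(div)
--     x = MULTIPLY(10, f)
--     a = get_nearest(x, columns_unmapped, columns_mapped)
--     v = INDIRECT(ADDRESS(a, COLUMN(COLROW(c[0], 1))))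
--
--     if len(c) == 1:
--         return IFNA(v, NA())
--     return IFNA(v, generate_per_col(s, c[1:]))
-- ===== SOURCE B (Python) =====
-- columns_unmapped = [0, 10, 20, 30, 40]
-- columns_mapped = [1, 11, 20, 29, 38]
--
-- def _inner(s, col):
--     # per-column formula: MATCH/DIVIDE/FLOOR/MULTIPLY, nearest-bucket IF chain, INDIRECT(ADDRESS(...))
--     x = f"MULTIPLY(10, FLOOR(DIVIDE(MATCH(\"{s}\", ${col}:${col}, 0), 10)))"
--     a = "NA()"
--     for u, m in reversed(list(zip(columns_unmapped, columns_mapped))):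
--         a = f"IF({x} = {u}, {m}, {a})"
--     return f"INDIRECT(ADDRESS({a}, COLUMN({col}1)))"
--
-- def generate_per_col(s, c):
--     acc = "NA()"
--     for col in reversed(c):
--         acc = f"IFNA({_inner(s, col)}, {acc})"
--     return acc
-- ===== Notes on version B (the rewrite author's own statement) =====
-- stated objective: simpler
-- what changed: Both recursions are replaced by iterative reverse folds: the nearest-bucket IF chain is a fold over reversed(zip(columns_unmapped, columns_mapped)) seeded with NA(), and the column nesting is a fold over reversed(c) seeded with NA(), with the per-column formula built directly as one f-string instead of a dozen helper functions.
-- crash fix: On c == [] A raises IndexError (c[0]); B's fold naturally returns "NA()". — e.g. on generate_per_col("x", []): A raises IndexError, B returns "NA()"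
import Mathlib
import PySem

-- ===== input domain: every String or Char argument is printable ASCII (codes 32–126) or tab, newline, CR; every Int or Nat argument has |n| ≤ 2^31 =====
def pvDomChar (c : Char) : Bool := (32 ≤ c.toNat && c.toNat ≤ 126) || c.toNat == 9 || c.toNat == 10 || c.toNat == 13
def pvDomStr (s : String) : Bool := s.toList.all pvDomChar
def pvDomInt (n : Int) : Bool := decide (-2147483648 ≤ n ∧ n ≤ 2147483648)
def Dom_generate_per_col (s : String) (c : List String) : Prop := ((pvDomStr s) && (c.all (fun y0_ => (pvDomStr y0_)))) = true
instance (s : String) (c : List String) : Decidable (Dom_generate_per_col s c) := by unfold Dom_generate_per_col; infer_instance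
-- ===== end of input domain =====

-- B replaces both recursions by iterative reverse folds (same output); equivalence is on nonempty c (A raises IndexError on []).

-- ===== PORT A =====
def pyCOL_REF (c : String) : String := "$" ++ c ++ ":$" ++ c
def pyCOLROW (c r : String) : String := c ++ r
def pyIFNA (r e : String) : String := "IFNA(" ++ r ++ ", " ++ e ++ ")"
def pyINDIRECT (r : String) : String := "INDIRECT(" ++ r ++ ")"
def pyADDRESS (r c : String) : String := "ADDRESS(" ++ r ++ ", " ++ c ++ ")"
def pyFLOOR (r : String) : String := "FLOOR(" ++ r ++ ")"
def pyCOLUMN (r : String) : String := "COLUMN(" ++ r ++ ")"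
def pyMATCH (r c t : String) : String := "MATCH(" ++ r ++ ", " ++ c ++ ", " ++ t ++ ")"
def pyNA : String := "NA()"
def pyMULTIPLY (a b : String) : String := "MULTIPLY(" ++ a ++ ", " ++ b ++ ")"
def pyDIVIDE (a b : String) : String := "DIVIDE(" ++ a ++ ", " ++ b ++ ")"
def pySTRING (a : String) : String := "\"" ++ a ++ "\""
def pyEQUALS (a b : String) : String := a ++ " = " ++ b
def pyIF (a b c : String) : String := "IF(" ++ a ++ ", " ++ b ++ ", " ++ c ++ ")"

def columns_unmapped : List Int := [0, 10, 20, 30, 40]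
def columns_mapped : List Int := [1, 11, 20, 29, 38]

-- A's recursive get_nearest; only ever called with the two equal-length nonempty constant lists
-- (on empty cu Python would raise IndexError; that case is unreachable here).
def get_nearest (n : String) (cu cm : List Int) : String :=
  match cu, cm with
  | [u], m :: _ =>
    let v := pyEQUALS n (PySem.Int.toStr u)
    pyIF v (PySem.Int.toStr m) pyNA
  | u :: us, m :: ms =>
    let v := pyEQUALS n (PySem.Int.toStr u)
    pyIF v (PySem.Int.toStr m) (get_nearest n us ms)
  | _, _ => ""

def generate_per_col (s : String) (c : List String) : String :=
  match c with
  | [] => ""  -- Python raises IndexError on c[0]; excluded by Pre_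
  | c0 :: rest =>
    let m := pyMATCH (pySTRING s) (pyCOL_REF c0) "0"
    let div := pyDIVIDE m "10"
    let f := pyFLOOR div
    let x := pyMULTIPLY "10" f
    let a := get_nearest x columns_unmapped columns_mapped
    let v := pyINDIRECT (pyADDRESS a (pyCOLUMN (pyCOLROW c0 "1")))
    if rest = [] then pyIFNA v pyNA
    else pyIFNA v (generate_per_col s rest)

-- ===== PORT B =====
def pvInner (s col : String) : String :=
  let x := "MULTIPLY(10, FLOOR(DIVIDE(MATCH(\"" ++ s ++ "\", $" ++ col ++ ":$" ++ col ++ ", 0), 10)))"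
  let a := (List.zip columns_unmapped columns_mapped).reverse.foldl
    (fun acc (p : Int × Int) =>
      "IF(" ++ x ++ " = " ++ PySem.Int.toStr p.1 ++ ", " ++ PySem.Int.toStr p.2 ++ ", " ++ acc ++ ")")
    "NA()"
  "INDIRECT(ADDRESS(" ++ a ++ ", COLUMN(" ++ col ++ "1)))"

def generate_per_col_alt (s : String) (c : List String) : String :=
  c.reverse.foldl (fun acc col => "IFNA(" ++ pvInner s col ++ ", " ++ acc ++ ")") "NA()"

-- ===== PRECONDITION & SPEC =====
-- Pre_ excludes only c = [], on which Python A raises IndexError.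
def Pre_generate_per_col (s : String) (c : List String) : Prop := c ≠ []
instance (s : String) (c : List String) : Decidable (Pre_generate_per_col s c) := by unfold Pre_generate_per_col; infer_instance
def pvWitness_generate_per_col : String × List String := ("foo", ["A", "B"])

-- On c == [] A raises IndexError (c[0]); B's fold naturally returns "NA()".
def Raises_generate_per_col (s : String) (c : List String) : Prop := c = []
instance (s : String) (c : List String) : Decidable (Raises_generate_per_col s c) := by unfold Raises_generate_per_col; infer_instance
def pvRaiseWitness_generate_per_col : String × List String := ("x", [])
def pvRaiseWitnessOut_generate_per_col : String := "NA()"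

def Spec_generate_per_col (s : String) (c : List String) (out : String) : Prop := out = generate_per_col_alt s c
instance (s : String) (c : List String) (out : String) : Decidable (Spec_generate_per_col s c out) := by unfold Spec_generate_per_col; infer_instance

-- ===== CLAIM (what is proved, stated in full; the proofs are below) =====
def Claim_equal_generate_per_col : Prop := ∀ (s : String) (c : List String), Dom_generate_per_col s c → Pre_generate_per_col s c → Spec_generate_per_col s c (generate_per_col s c)
def Claim_raises_generate_per_col : Prop := (∀ (s : String) (c : List String), Dom_generate_per_col s c → Raises_generate_per_col s c → ¬ Pre_generate_per_col s c) ∧ (Dom_generate_per_col (pvRaiseWitness_generate_per_col.1) (pvRaiseWitness_generate_per_col.2) ∧ Raises_generate_per_col (pvRaiseWitness_generate_per_col.1) (pvRaiseWitness_generate_per_col.2) ∧ generate_per_col_alt (pvRaiseWitness_generate_per_col.1) (pvRaiseWitness_generate_per_col.2) = pvRaiseWitnessOut_generate_per_col)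

-- ===== LEMMAS AND PROOFS =====

-- B's fold peels one column off the front.
theorem alt_cons (s c0 : String) (rest : List String) :
    generate_per_col_alt s (c0 :: rest) =
      "IFNA(" ++ pvInner s c0 ++ ", " ++ generate_per_col_alt s rest ++ ")" := by
  simp [generate_per_col_alt, List.foldl_append]

-- A's inline per-column value equals B's pvInner.
theorem inner_eq (s c0 : String) :
    pyINDIRECT (pyADDRESS
      (get_nearest
        (pyMULTIPLY "10" (pyFLOOR (pyDIVIDE (pyMATCH (pySTRING s) (pyCOL_REF c0) "0") "10")))
        columns_unmapped columns_mapped)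
      (pyCOLUMN (pyCOLROW c0 "1"))) = pvInner s c0 := by
  set_option maxRecDepth 4000 in
  rw [← String.toList_inj]
  simp [pvInner, pyINDIRECT, pyADDRESS, pyCOLUMN, pyCOLROW, pyMULTIPLY, pyFLOOR, pyDIVIDE,
    pyMATCH, pySTRING, pyCOL_REF, columns_unmapped, columns_mapped, get_nearest, pyIF,
    pyEQUALS, pyNA, String.toList_append, List.foldl]

-- ===== VERDICT (by name: the statement is the Claim_ definition above) =====
theorem generate_per_col_spec : Claim_equal_generate_per_col := by
  intro s c hdom hpre
  unfold Spec_generate_per_col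
  induction c with
  | nil => exact absurd rfl hpre
  | cons c0 rest ih =>
    rw [alt_cons, ← inner_eq s c0]
    cases rest with
    | nil =>
      rw [← String.toList_inj]
      simp [generate_per_col, generate_per_col_alt, pyIFNA, pyNA, String.toList_append]
    | cons r1 rs =>
      rw [← ih (by revert hdom; simp [Dom_generate_per_col]; tauto) (List.cons_ne_nil r1 rs), ← String.toList_inj]
      simp [generate_per_col, pyIFNA, String.toList_append]

@[simp] theorem generate_per_col_raises : Claim_raises_generate_per_col := by
  unfold Claim_raises_generate_per_col
  exact ⟨fun s c _ h => by simp [Raises_generate_per_col] at h; simp [Pre_generate_per_col, h], by decide⟩
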